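-- pv_equiv track=rewrite | github.com/EscasanN/Laboratorio_2-TC | shunting_yard.py | expand_plus_question
-- ===== SOURCE A (Python) =====
-- def pop_prev_atom(lst):
--     if not lst:
--         raise ValueError("No previous atom to pop")
--     if lst[-1] == ')':
--         depth = 1
--         j = len(lst) - 2
--         while j >= 0:
--             if lst[j] == ')':
--                 depth += 1
--             elif lst[j] == '(':
--                 depth -= 1
--                 if depth == 0:
--                     atom = lst[j:]
--                     del lst[j:]
--                     return atom
--             j -= 1
--         raise ValueError("Unmatched parenthesis in expansion")
--     else:
--         return [lst.pop()]
--
-- def expand_plus_question(tokens):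
--     new_tokens = []
--     i = 0
--     while i < len(tokens):
--         tok = tokens[i]
--         if tok == '+':
--             atom = pop_prev_atom(new_tokens)
--             # X+ -> X X*
--             new_tokens.extend(atom)
--             new_tokens.extend(atom)
--             new_tokens.append('*')
--             i += 1
--         elif tok == '?':
--             atom = pop_prev_atom(new_tokens)
--             # X? -> (X|ε)
--             new_tokens.append('(')
--             new_tokens.extend(atom)
--             new_tokens.append('|')
--             new_tokens.append('ε')
--             new_tokens.append(')')
--             i += 1
--         else:
--             new_tokens.append(tok)
--             i += 1
--     return new_tokens
-- ===== SOURCE B (Python) =====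
-- def expand_plus_question(tokens):
--     # One forward pass: build the output once, keeping a stack of start
--     # indices of the atoms (and of open '(' groups) already written to it,
--     # so the previous atom is a slice of the output rather than the result
--     # of a backward paren-matching rescan.
--     out = []
--     stack = []  # (is_open_group, start index in out)
--     for tok in tokens:
--         if tok == '+':
--             if not stack or stack[-1][0]:
--                 raise ValueError("No previous atom to pop")
--             atom = out[stack[-1][1]:]          # X+ -> X X*
--             stack.append((False, len(out)))
--             out += atom
--             stack.append((False, len(out)))
--             out.append('*')
--         elif tok == '?':
--             if not stack or stack[-1][0]:
--                 raise ValueError("No previous atom to pop")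
--             s = stack[-1][1]
--             atom = out[s:]                     # X? -> (X|ε)
--             del out[s:]
--             out += ['(', *atom, '|', 'ε', ')']
--         elif tok == '(':
--             stack.append((True, len(out)))
--             out.append(tok)
--         elif tok == ')':
--             while stack and not stack[-1][0]:
--                 stack.pop()
--             if stack:                          # close the innermost group
--                 stack[-1] = (False, stack[-1][1])
--             else:                              # no open group: ')' is a plain token
--                 stack.append((False, len(out)))
--             out.append(tok)
--         else:
--             stack.append((False, len(out)))
--             out.append(tok)
--     return out
-- ===== Notes on version B (the rewrite author's own statement) =====
-- stated objective: alternative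
-- what changed: B builds the output in a single forward pass while keeping a stack of start indices of the atoms already written to it, so the previous atom of '+'/'?' is read off as a slice instead of A's backward paren-matching rescan (pop_prev_atom); Pre_ excludes the inputs where A raises ValueError and the inputs where '+'/'?' directly follows an open '(', on which A accidentally expands the lone '(' as an atom while B raises ValueError.
-- outside the precondition, e.g. on expand_plus_question(['(', '+']): A returns ['(', '(', '*'], B raises ValueError
import Mathlib
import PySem

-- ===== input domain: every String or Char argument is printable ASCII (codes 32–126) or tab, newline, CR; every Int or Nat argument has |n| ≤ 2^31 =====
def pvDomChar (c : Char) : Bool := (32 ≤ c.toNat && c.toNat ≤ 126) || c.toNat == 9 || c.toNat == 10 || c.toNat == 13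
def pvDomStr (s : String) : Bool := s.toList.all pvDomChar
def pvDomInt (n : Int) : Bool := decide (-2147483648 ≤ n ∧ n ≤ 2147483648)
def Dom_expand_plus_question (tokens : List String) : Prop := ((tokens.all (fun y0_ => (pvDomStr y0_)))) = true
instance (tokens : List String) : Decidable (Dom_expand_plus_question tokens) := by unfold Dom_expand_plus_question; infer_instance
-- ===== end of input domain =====

-- B replaces A's backward pop_prev_atom rescans by a single forward pass that tracks
-- atom start indices into the output on a stack (objective: alternative, same cost).

-- ===== PORT A =====
-- pop_prev_atom's backward while-loop (j from len-2 down to 0) scans the reversed prefix;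
-- `some j` is the matched index (j = number of elements below it), `none` = the ValueError.
def pvScanBack (depth : Int) : List String → Option Nat
  | [] => none
  | c :: rest =>
    if c = ")" then pvScanBack (depth + 1) rest
    else if c = "(" then
      if depth - 1 = 0 then some rest.length
      else pvScanBack (depth - 1) rest
    else pvScanBack depth rest

-- pop_prev_atom: `none` = raise; otherwise (atom, remaining lst) models (return value, lst after del/pop)
def pvPopPrevAtom (lst : List String) : Option (List String × List String) :=
  match lst.getLast? with
  | none => none
  | some t =>
    if t = ")" then
      match pvScanBack 1 lst.dropLast.reverse with
      | some j => some (lst.drop j, lst.take j)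
      | none => none
    else some ([t], lst.dropLast)

-- the while i < len(tokens) loop; acc is new_tokens; `none` = a ValueError propagated
def pvExpandA (acc : List String) : List String → Option (List String)
  | [] => some acc
  | tok :: rest =>
    if tok = "+" then
      match pvPopPrevAtom acc with
      | none => none
      | some (atom, remain) => pvExpandA (remain ++ atom ++ atom ++ ["*"]) rest
    else if tok = "?" then
      match pvPopPrevAtom acc with
      | none => none
      | some (atom, remain) => pvExpandA (remain ++ ["("] ++ atom ++ ["|", "ε", ")"]) rest
    else pvExpandA (acc ++ [tok]) rest

def expand_plus_question (tokens : List String) : List String :=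
  (pvExpandA [] tokens).getD []

-- ===== PORT B =====
-- Source B's `while stack and not stack[-1][0]: stack.pop()` + close/plain-token branch on ')';
-- n is len(out) at the moment of the ')' (stack top = list head here).
def pvCloseB (n : Nat) : List (Bool × Nat) → List (Bool × Nat)
  | [] => [(false, n)]
  | (true, s) :: rest => (false, s) :: rest
  | (false, _) :: rest => pvCloseB n rest

-- one iteration of Source B's for-loop; out[s:] = out.drop s, del out[s:] = out.take s
-- (s is always ≤ len(out) here, so Python's slice is exactly drop/take);
-- `none` = the ValueError on '+'/'?' with no complete previous atom.
def pvBStep (out : List String) (stk : List (Bool × Nat)) (tok : String) :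
    Option (List String × List (Bool × Nat)) :=
  if tok = "+" then
    match stk with
    | (false, s) :: _ =>
      some (out ++ out.drop s ++ ["*"],
            (false, (out ++ out.drop s).length) :: (false, out.length) :: stk)
    | _ => none
  else if tok = "?" then
    match stk with
    | (false, s) :: rest =>
      some (out.take s ++ ["("] ++ out.drop s ++ ["|", "ε", ")"], (false, s) :: rest)
    | _ => none
  else if tok = "(" then some (out ++ ["("], (true, out.length) :: stk)
  else if tok = ")" then some (out ++ [")"], pvCloseB out.length stk)
  else some (out ++ [tok], (false, out.length) :: stk)

def pvRunB : List String → List (Bool × Nat) → List String → Option (List String × List (Bool × Nat))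
  | out, stk, [] => some (out, stk)
  | out, stk, tok :: rest =>
    match pvBStep out stk tok with
    | none => none
    | some (o, s) => pvRunB o s rest

def expand_plus_question_alt (tokens : List String) : List String :=
  match pvRunB [] [] tokens with
  | some (o, _) => o
  | none => []

-- ===== PRECONDITION & SPEC =====
-- Shape abstraction used only by Pre_: L = an open '(', A = a complete previous atom,
-- J = a plain ')' token with no open group (A's pop_prev_atom raises on it).
inductive PvSh where
  | L : PvSh
  | A : PvSh
  | J : PvSh
deriving DecidableEq, Repr

def pvPreClose : List PvSh → List PvSh
  | [] => [.J]
  | .L :: r => .A :: r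
  | .A :: r => pvPreClose r
  | .J :: r => pvPreClose r

def pvPreStep (st : List PvSh) (tok : String) : Option (List PvSh) :=
  if tok = "+" then
    match st with
    | .A :: r => some (.A :: .A :: .A :: r)
    | _ => none
  else if tok = "?" then
    match st with
    | .A :: r => some (.A :: r)
    | _ => none
  else if tok = "(" then some (.L :: st)
  else if tok = ")" then some (pvPreClose st)
  else some (.A :: st)

def pvPreRun : List PvSh → List String → Option (List PvSh)
  | st, [] => some st
  | st, tok :: rest =>
    match pvPreStep st tok with
    | none => none
    | some st' => pvPreRun st' rest

-- Pre_ excludes (i) the inputs on which A raises ValueError ('+'/'?' with no previous token,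
-- or whose previous atom ends in an unmatched ')'), and (ii) the inputs where '+'/'?' directly
-- follows an open '(': there A returns an accidental expansion of the lone '(' (pop_prev_atom's
-- last-token fallback) while B raises ValueError, since no complete atom precedes the operator.
def Pre_expand_plus_question (tokens : List String) : Prop :=
  (pvPreRun [] tokens).isSome = true
instance (tokens : List String) : Decidable (Pre_expand_plus_question tokens) := by
  unfold Pre_expand_plus_question; infer_instance

def pvWitness_expand_plus_question : List String := ["a", "+", "(", "b", "?", ")", "+"]

def Spec_expand_plus_question (tokens : List String) (out : List String) : Prop := out = expand_plus_question_alt tokens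
instance (tokens : List String) (out : List String) : Decidable (Spec_expand_plus_question tokens out) := by unfold Spec_expand_plus_question; infer_instance

-- ===== CLAIM (what is proved, stated in full; the proofs are below) =====
def Claim_equal_expand_plus_question : Prop := ∀ (tokens : List String), Dom_expand_plus_question tokens → Pre_expand_plus_question tokens → Spec_expand_plus_question tokens (expand_plus_question tokens)

-- ===== LEMMAS AND PROOFS =====

-- number of ')' minus number of '(' in a token list
def pvCnt (xs : List String) : Int := (xs.count ")" : Int) - (xs.count "(" : Int)

-- a concatenation of complete atoms: balanced, suffix-nonnegative, every '(' strictly matched inside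
def PvMidOK (xs : List String) : Prop :=
  pvCnt xs = 0 ∧ (∀ a b, xs = a ++ b → 0 ≤ pvCnt b) ∧
    (∀ a b, xs = a ++ "(" :: b → 1 ≤ pvCnt b)

-- what pop_prev_atom can see as the previous atom: a single non-paren token, or a closed group
def PvAtomP (xs : List String) : Prop :=
  (∃ t, xs = [t] ∧ t ≠ ")" ∧ t ≠ "(") ∨ (∃ ys, xs = "(" :: ys ++ [")"] ∧ PvMidOK ys)

-- correspondence: shape stack ~ B's index stack ~ the output list built so far
def PvCorr : List PvSh → List (Bool × Nat) → List String → Prop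
  | [], [], out => out = []
  | .L :: sh, (true, s) :: bs, out =>
      ∃ pre, out = pre ++ ["("] ∧ s = pre.length ∧ PvCorr sh bs pre
  | .A :: sh, (false, s) :: bs, out =>
      ∃ pre X, out = pre ++ X ∧ s = pre.length ∧ PvAtomP X ∧ PvCorr sh bs pre
  | .J :: sh, (false, s) :: bs, out =>
      sh = [] ∧ bs = [] ∧ ∃ pre, out = pre ++ [")"] ∧ s = pre.length
  | _, _, _ => False

theorem pvCnt_nil : pvCnt [] = 0 := by simp [pvCnt]

theorem pvCnt_append (a b : List String) : pvCnt (a ++ b) = pvCnt a + pvCnt b := by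
  simp [pvCnt, List.count_append]; ring

theorem pvCnt_cons (c : String) (r : List String) :
    pvCnt (c :: r) = (if c = ")" then 1 else 0) - (if c = "(" then 1 else 0) + pvCnt r := by
  simp [pvCnt, List.count_cons]
  by_cases h1 : c = ")" <;> by_cases h2 : c = "(" <;> simp_all <;> ring

theorem pvCnt_reverse (xs : List String) : pvCnt xs.reverse = pvCnt xs := by
  simp [pvCnt, List.count_reverse]

-- split of an append at a cons
theorem pv_append_cons_split {α : Type} (l₁ l₂ a b : List α) (x : α)
    (h : l₁ ++ l₂ = a ++ x :: b) :
    (∃ b₁, l₁ = a ++ x :: b₁ ∧ b = b₁ ++ l₂) ∨ (∃ a₂, a = l₁ ++ a₂ ∧ l₂ = a₂ ++ x :: b) := by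
  rcases List.append_eq_append_iff.mp h with ⟨w, hw1, hw2⟩ | ⟨w, hw1, hw2⟩
  · right; exact ⟨w, hw1, hw2⟩
  · cases w with
    | nil => right; exact ⟨[], by simp [hw1], by simpa using hw2.symm⟩
    | cons y w' =>
      left
      cases hw2
      exact ⟨w', by simpa using hw1, by simp⟩

theorem pvMidOK_nil : PvMidOK [] := by
  refine ⟨pvCnt_nil, ?_, ?_⟩
  · intro a b hab
    have : b = [] := by cases a <;> simp_all
    simp [this, pvCnt_nil]
  · intro a b hab; simp at hab

theorem pvMidOK_single (t : String) (h1 : t ≠ ")") (h2 : t ≠ "(") : PvMidOK [t] := by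
  refine ⟨by simp [pvCnt_cons, h1, h2, pvCnt_nil], ?_, ?_⟩
  · intro a b hab
    rcases List.append_eq_cons_iff.mp hab.symm with ⟨ha, hb⟩ | ⟨a', ha, hb⟩
    · subst hb; simp [pvCnt_cons, h1, h2, pvCnt_nil]
    · have hlen := congrArg List.length hb
      simp at hlen
      have hb0 : b = [] := List.eq_nil_of_length_eq_zero (by omega)
      simp [hb0, pvCnt_nil]
  · intro a b hab
    rcases List.append_eq_cons_iff.mp hab.symm with ⟨ha, hb⟩ | ⟨a', ha, hb⟩
    · exact absurd (by injection hb with h _; exact h.symm) h2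
    · exfalso
      have hlen := congrArg List.length hb
      simp at hlen

theorem pvCnt_rp : pvCnt [")"] = 1 := by simp [pvCnt]
theorem pvCnt_group (ys : List String) : pvCnt ("(" :: ys ++ [")"]) = pvCnt ys := by
  simp [pvCnt, List.count_append]

theorem pvMidOK_append {a b : List String} (ha : PvMidOK a) (hb : PvMidOK b) :
    PvMidOK (a ++ b) := by
  obtain ⟨ha0, ha1, ha2⟩ := ha
  obtain ⟨hb0, hb1, hb2⟩ := hb
  refine ⟨by rw [pvCnt_append, ha0, hb0]; ring, ?_, ?_⟩
  · intro p q hpq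
    rcases List.append_eq_append_iff.mp hpq.symm with ⟨w, hw1, hw2⟩ | ⟨w, hw1, hw2⟩
    · rw [hw2, pvCnt_append, hb0]
      have := ha1 p w hw1
      omega
    · exact hb1 w q hw2
  · intro p q hpq
    rcases pv_append_cons_split a b p q "(" hpq with ⟨b₁, hb₁, hq⟩ | ⟨a₂, hp, hq⟩
    · rw [hq, pvCnt_append, hb0]
      have := ha2 p b₁ hb₁
      omega
    · exact hb2 a₂ q hq

theorem pvAtomP_midOK {xs : List String} (h : PvAtomP xs) : PvMidOK xs := by
  rcases h with ⟨t, rfl, h1, h2⟩ | ⟨ys, rfl, hys⟩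
  · exact pvMidOK_single t h1 h2
  · obtain ⟨hy0, hy1, hy2⟩ := hys
    refine ⟨by rw [pvCnt_group, hy0], ?_, ?_⟩
    · intro p q hpq
      cases p with
      | nil =>
        simp at hpq
        rw [← hpq]
        simp [pvCnt, List.count_append] at hy0 ⊢
        omega
      | cons c p' =>
        injection hpq with hc ht
        rcases List.append_eq_append_iff.mp ht.symm with ⟨w, hw1, hw2⟩ | ⟨w, hw1, hw2⟩
        · rw [hw2, pvCnt_append, pvCnt_rp]
          have := hy1 p' w hw1
          omega
        · cases w with
          | nil =>
            simp at hw2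
            rw [← hw2, pvCnt_rp]; omega
          | cons z w' =>
            injection hw2 with hz hw'
            have hq : q = [] := by
              have := congrArg List.length hw'; simp at this
              exact List.eq_nil_of_length_eq_zero (by omega)
            rw [hq, pvCnt_nil]
    · intro p q hpq
      cases p with
      | nil =>
        injection hpq with hc ht
        rw [← ht]
        simp [pvCnt, List.count_append] at hy0 ⊢
        omega
      | cons c p' =>
        injection hpq with hc ht
        rcases pv_append_cons_split ys [")"] p' q "(" ht with ⟨b₁, hb₁, hq⟩ | ⟨a₂, hp, hq⟩
        · rw [hq, pvCnt_append, pvCnt_rp]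
          have := hy2 p' b₁ hb₁
          omega
        · exfalso
          cases a₂ with
          | nil => simp at hq
          | cons z w' =>
            injection hq with hz hw'
            have := congrArg List.length hw'; simp at this

theorem pv_rev_split {ys p q : List String} (h : ys.reverse = p ++ "(" :: q) :
    ys = q.reverse ++ "(" :: p.reverse := by
  have := congrArg List.reverse h
  simpa using this

theorem pvScan_pass (r : List String) :
    ∀ (d : Int) (l : List String), (∀ p q, r = p ++ "(" :: q → d + pvCnt p ≠ 1) →
      pvScanBack d (r ++ l) = pvScanBack (d + pvCnt r) l := by
  induction r with
  | nil => intro d l _; simp [pvCnt_nil]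
  | cons c r' ih =>
    intro d l hcond
    by_cases h1 : c = ")"
    · subst h1
      rw [List.cons_append]
      rw [show pvScanBack d (")" :: (r' ++ l)) = pvScanBack (d + 1) (r' ++ l) by simp [pvScanBack]]
      rw [ih (d + 1) l ?_]
      · congr 1
        rw [pvCnt_cons]; simp; ring
      · intro p q hpq
        have := hcond (")" :: p) q (by rw [hpq, List.cons_append])
        rw [pvCnt_cons] at this; simp at this
        omega
    · by_cases h2 : c = "("
      · subst h2
        have hd : d ≠ 1 := by
          have := hcond [] r' rfl
          simpa [pvCnt_nil] using this
        rw [List.cons_append]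
        rw [show pvScanBack d ("(" :: (r' ++ l)) = pvScanBack (d - 1) (r' ++ l) by
          simp [pvScanBack]; intro h; exfalso; omega]
        rw [ih (d - 1) l ?_]
        · congr 1
          rw [pvCnt_cons]; simp; ring
        · intro p q hpq
          have := hcond ("(" :: p) q (by rw [hpq, List.cons_append])
          rw [pvCnt_cons] at this; simp at this
          omega
      · rw [List.cons_append]
        rw [show pvScanBack d (c :: (r' ++ l)) = pvScanBack d (r' ++ l) by
          simp [pvScanBack, h1, h2]]
        rw [ih d l ?_]
        · congr 1
          rw [pvCnt_cons]; simp [h1, h2]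
        · intro p q hpq
          have := hcond (c :: p) q (by rw [hpq, List.cons_append])
          rw [pvCnt_cons] at this; simp [h1, h2] at this
          exact this

theorem pvScan_mid {ys : List String} (h : PvMidOK ys) (l : List String) :
    pvScanBack 1 (ys.reverse ++ l) = pvScanBack 1 l := by
  obtain ⟨h0, _, h2⟩ := h
  rw [pvScan_pass ys.reverse 1 l ?_]
  · rw [pvCnt_reverse, h0]
    norm_num
  · intro p q hpq
    have hsplit := pv_rev_split hpq
    have := h2 q.reverse p.reverse hsplit
    rw [pvCnt_reverse] at this
    omega

-- pop_prev_atom returns exactly the atom slice, whatever sits before it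
theorem pvPop_atom (pre : List String) {X : List String} (h : PvAtomP X) :
    pvPopPrevAtom (pre ++ X) = some (X, pre) := by
  rcases h with ⟨t, rfl, h1, h2⟩ | ⟨ys, rfl, hys⟩
  · unfold pvPopPrevAtom
    rw [List.getLast?_concat]
    simp [h1]
  · unfold pvPopPrevAtom
    have hshape : pre ++ ("(" :: ys ++ [")"]) = (pre ++ "(" :: ys) ++ [")"] := by
      simp
    rw [hshape, List.getLast?_concat]
    have hrev : ((pre ++ "(" :: ys) ++ [")"]).dropLast.reverse
        = ys.reverse ++ ("(" :: pre.reverse) := by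
      rw [List.dropLast_concat]
      simp
    rw [hrev, pvScan_mid hys]
    rw [show pvScanBack 1 ("(" :: pre.reverse) = some pre.reverse.length by
      simp [pvScanBack]]
    rw [List.length_reverse]
    rw [← hshape]
    simp

theorem pvMidOK_pipe_eps : PvMidOK ["|", "ε"] := by
  have h := pvMidOK_append (pvMidOK_single "|" (by decide) (by decide))
    (pvMidOK_single "ε" (by decide) (by decide))
  simpa using h

theorem pvAtomP_star : PvAtomP ["*"] := Or.inl ⟨"*", rfl, by decide, by decide⟩

theorem pvAtomP_qatom {xs : List String} (h : PvAtomP xs) :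
    PvAtomP ("(" :: xs ++ ["|", "ε", ")"]) := by
  refine Or.inr ⟨xs ++ ["|", "ε"], ?_, pvMidOK_append (pvAtomP_midOK h) pvMidOK_pipe_eps⟩
  simp

-- closing a ')' preserves the correspondence
theorem pvClose_corr :
    ∀ (sh : List PvSh) (stk : List (Bool × Nat)) (out mid : List String) (n : Nat),
      PvCorr sh stk out → PvMidOK mid → n = out.length + mid.length →
      PvCorr (pvPreClose sh) (pvCloseB n stk) (out ++ mid ++ [")"]) := by
  intro sh
  induction sh with
  | nil =>
    intro stk out mid n hc hm hn
    match stk, hc with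
    | [], hout =>
      subst hout
      exact ⟨rfl, rfl, mid, by simp, by simpa using hn⟩
  | cons s sh' ih =>
    intro stk out mid n hc hm hn
    cases s with
    | L =>
      match stk, hc with
      | (true, s) :: bs, ⟨pre, hout, hs, hrec⟩ =>
        refine ⟨pre, "(" :: mid ++ [")"], ?_, hs, Or.inr ⟨mid, rfl, hm⟩, hrec⟩
        rw [hout]; simp
    | A =>
      match stk, hc with
      | (false, s) :: bs, ⟨pre, X, hout, hs, hX, hrec⟩ =>
        show PvCorr (pvPreClose sh') (pvCloseB n bs) _
        have h1 := ih bs pre (X ++ mid) n hrec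
          (pvMidOK_append (pvAtomP_midOK hX) hm)
          (by rw [hn, hout]; simp; ring)
        have : pre ++ (X ++ mid) ++ [")"] = out ++ mid ++ [")"] := by rw [hout]; simp
        rwa [this] at h1
    | J =>
      match stk, hc with
      | (false, s) :: bs, ⟨hsh, hbs, pre, hout, hs⟩ =>
        subst hsh; subst hbs
        show PvCorr [PvSh.J] [(false, n)] _
        exact ⟨rfl, rfl, out ++ mid, by simp, by simp [hn]⟩

-- main simulation: under the Pre_ shape run, B's step-by-step state tracks A's list
theorem pvMain :
    ∀ (toks : List String) (sh : List PvSh) (stk : List (Bool × Nat)) (out : List String),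
      PvCorr sh stk out → (pvPreRun sh toks).isSome = true →
      ∃ o s, pvRunB out stk toks = some (o, s) ∧ pvExpandA out toks = some o := by
  intro toks
  induction toks with
  | nil => intro sh stk out _ _; exact ⟨out, stk, rfl, rfl⟩
  | cons tok rest ih =>
    intro sh stk out hc hpre
    by_cases h1 : tok = "+"
    · subst h1
      match sh, hpre with
      | .A :: sh', hpre =>
        match stk, hc with
        | (false, s) :: bs, ⟨pre, X, hout, hs, hX, hrec⟩ =>
          have hdrop : out.drop s = X := by rw [hout, hs]; simp
          have hpre' : (pvPreRun (.A :: .A :: .A :: sh') rest).isSome = true := by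
            simpa [pvPreRun, pvPreStep] using hpre
          have hcorr' : PvCorr (.A :: .A :: .A :: sh')
              ((false, (out ++ X).length) :: (false, out.length) :: (false, s) :: bs)
              (out ++ X ++ ["*"]) := by
            exact ⟨out ++ X, ["*"], by simp, rfl, pvAtomP_star,
              out, X, rfl, rfl, hX, pre, X, hout, hs, hX, hrec⟩
          obtain ⟨o, st, hB, hA⟩ := ih _ _ _ hcorr' hpre'
          refine ⟨o, st, ?_, ?_⟩
          · simp only [pvRunB, pvBStep, hdrop]
            exact hB
          · simp only [pvExpandA, hout, pvPop_atom pre hX]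
            rw [show pre ++ X ++ X ++ ["*"] = out ++ X ++ ["*"] by rw [hout]]
            exact hA
    · by_cases h2 : tok = "?"
      · subst h2
        match sh, hpre with
        | .A :: sh', hpre =>
          match stk, hc with
          | (false, s) :: bs, ⟨pre, X, hout, hs, hX, hrec⟩ =>
            have hdrop : out.drop s = X := by rw [hout, hs]; simp
            have htake : out.take s = pre := by rw [hout, hs]; simp
            have hpre' : (pvPreRun (.A :: sh') rest).isSome = true := by
              simpa [pvPreRun, pvPreStep] using hpre
            have hcorr' : PvCorr (.A :: sh') ((false, s) :: bs)
                (pre ++ ("(" :: X ++ ["|", "ε", ")"])) :=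
              ⟨pre, "(" :: X ++ ["|", "ε", ")"], rfl, hs, pvAtomP_qatom hX, hrec⟩
            obtain ⟨o, st, hB, hA⟩ := ih _ _ _ hcorr' hpre'
            refine ⟨o, st, ?_, ?_⟩
            · simp only [pvRunB, pvBStep, if_neg (by decide : ¬("?" = "+")),
                hdrop, htake]
              rw [show pre ++ ["("] ++ X ++ ["|", "ε", ")"]
                  = pre ++ ("(" :: X ++ ["|", "ε", ")"]) by simp]
              exact hB
            · simp only [pvExpandA, if_neg (by decide : ¬("?" = "+")), hout,
                pvPop_atom pre hX]
              rw [show pre ++ ["("] ++ X ++ ["|", "ε", ")"]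
                  = pre ++ ("(" :: X ++ ["|", "ε", ")"]) by simp]
              exact hA
      · by_cases h3 : tok = "("
        · subst h3
          have hpre' : (pvPreRun (.L :: sh) rest).isSome = true := by
            simpa [pvPreRun, pvPreStep] using hpre
          have hcorr' : PvCorr (.L :: sh) ((true, out.length) :: stk) (out ++ ["("]) :=
            ⟨out, rfl, rfl, hc⟩
          obtain ⟨o, st, hB, hA⟩ := ih _ _ _ hcorr' hpre'
          refine ⟨o, st, ?_, ?_⟩
          · simpa [pvRunB, pvBStep] using hB
          · simpa [pvExpandA] using hA
        · by_cases h4 : tok = ")"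
          · subst h4
            have hpre' : (pvPreRun (pvPreClose sh) rest).isSome = true := by
              simpa [pvPreRun, pvPreStep] using hpre
            have hcorr' : PvCorr (pvPreClose sh) (pvCloseB out.length stk) (out ++ [")"]) := by
              have := pvClose_corr sh stk out [] out.length hc pvMidOK_nil (by simp)
              simpa using this
            obtain ⟨o, st, hB, hA⟩ := ih _ _ _ hcorr' hpre'
            refine ⟨o, st, ?_, ?_⟩
            · simpa [pvRunB, pvBStep] using hB
            · simpa [pvExpandA] using hA
          · have hpre' : (pvPreRun (.A :: sh) rest).isSome = true := by
              simpa [pvPreRun, pvPreStep, h1, h2, h3, h4] using hpre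
            have hcorr' : PvCorr (.A :: sh) ((false, out.length) :: stk) (out ++ [tok]) :=
              ⟨out, [tok], rfl, rfl, Or.inl ⟨tok, rfl, h4, h3⟩, hc⟩
            obtain ⟨o, st, hB, hA⟩ := ih _ _ _ hcorr' hpre'
            refine ⟨o, st, ?_, ?_⟩
            · simpa [pvRunB, pvBStep, h1, h2, h3, h4] using hB
            · simpa [pvExpandA, h1, h2] using hA

-- ===== VERDICT (by name: the statement is the Claim_ definition above) =====
theorem expand_plus_question_spec : Claim_equal_expand_plus_question := by
  intro tokens _ hpre
  unfold Spec_expand_plus_question expand_plus_question expand_plus_question_alt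
  obtain ⟨o, s, hB, hA⟩ := pvMain tokens [] [] [] rfl hpre
  rw [hA, hB]
  rfl
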